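-- pv_equiv track=rewrite | github.com/GazePlay/GazePlayDataProcessing | src/dataprocessing.py | groupConsecutiveFixationCoord
-- ===== SOURCE A (Python) =====
-- def groupConsecutiveFixationCoord(li, maxgap):
--     out = []
--     last = li[0][0]
--     for x in li:
--         if x[0] - last > maxgap:
--             yield out
--             out = []
--         out.append(x[1])
--         last = x[0]
--     yield out
-- ===== SOURCE B (Python) =====
-- def groupConsecutiveFixationCoord(li, maxgap):
--     # Precompute break positions (an element whose gap to its predecessor exceeds
--     # maxgap starts a new group; the first element's predecessor is itself), then
--     # yield one slice of y-values per pair of consecutive bounds.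
--     n = len(li)
--     prevs = li[:1] + li[:-1]
--     breaks = [i for i, (p, x) in enumerate(zip(prevs, li)) if x[0] - p[0] > maxgap]
--     bounds = [0] + breaks + [n]
--     for a, b in zip(bounds, bounds[1:]):
--         yield [x[1] for x in li[a:b]]
-- ===== Notes on version B (the rewrite author's own statement) =====
-- stated objective: alternative
-- what changed: B replaces A's stateful accumulate-and-yield loop by first computing the list of break indices (elements whose gap to their predecessor exceeds maxgap), forming bounds = [0]+breaks+[n], and yielding one slice of y-values per pair of consecutive bounds.
import Mathlib
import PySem

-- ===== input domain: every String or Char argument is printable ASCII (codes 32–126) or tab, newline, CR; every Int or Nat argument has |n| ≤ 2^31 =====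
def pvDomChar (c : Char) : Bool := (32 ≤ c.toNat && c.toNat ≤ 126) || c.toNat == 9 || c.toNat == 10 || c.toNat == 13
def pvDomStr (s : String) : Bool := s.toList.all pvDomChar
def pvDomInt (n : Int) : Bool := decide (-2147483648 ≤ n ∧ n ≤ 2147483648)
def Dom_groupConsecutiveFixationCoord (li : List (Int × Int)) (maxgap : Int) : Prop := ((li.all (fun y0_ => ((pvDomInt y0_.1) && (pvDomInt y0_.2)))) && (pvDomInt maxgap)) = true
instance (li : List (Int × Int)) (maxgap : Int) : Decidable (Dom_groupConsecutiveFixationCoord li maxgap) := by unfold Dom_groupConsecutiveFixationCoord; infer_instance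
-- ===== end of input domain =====

-- B replaces A's stateful accumulate-and-yield loop by a precomputed list of break
-- indices and one slice per pair of consecutive bounds (objective: alternative decomposition).

-- ===== PORT A =====
-- Literal port of A: the generator's state is (groups yielded so far, current group, last);
-- li[0][0] on empty li raises IndexError in Python (excluded by Pre_), here the none branch.
def groupConsecutiveFixationCoord (li : List (Int × Int)) (maxgap : Int) : List (List Int) :=
  match PySem.List.pyGet? li 0 with
  | none => []
  | some p =>
    let st := li.foldl
      (fun (s : List (List Int) × List Int × Int) (x : Int × Int) =>
        if x.1 - s.2.2 > maxgap then (s.1 ++ [s.2.1], [x.2], x.1)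
        else (s.1, s.2.1 ++ [x.2], x.1))
      ([], [], p.1)
    st.1 ++ [st.2.1]

-- ===== PORT B =====
-- Literal port of Source B: prevs = li[:1] + li[:-1]; breaks from enumerate(zip(prevs, li));
-- bounds = [0] + breaks + [n]; one slice of y-values per consecutive bound pair.
def groupConsecutiveFixationCoord_alt (li : List (Int × Int)) (maxgap : Int) : List (List Int) :=
  let n : Int := li.length
  let prevs := PySem.List.slice li none (some 1) ++ PySem.List.slice li none (some (-1))
  let breaks := ((PySem.List.enumerate (prevs.zip li) 0).filter
      (fun q => decide (q.2.2.1 - q.2.1.1 > maxgap))).map (fun q => q.1)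
  let bounds := ([0] ++ breaks) ++ [n]
  (bounds.zip bounds.tail).map
    (fun ab => (PySem.List.slice li (some ab.1) (some ab.2)).map (fun x => x.2))

-- ===== PRECONDITION & SPEC =====
-- Pre_ excludes exactly the empty list, on which Python A raises IndexError (li[0][0]).
def Pre_groupConsecutiveFixationCoord (li : List (Int × Int)) (maxgap : Int) : Prop := li ≠ []
instance (li : List (Int × Int)) (maxgap : Int) : Decidable (Pre_groupConsecutiveFixationCoord li maxgap) := by unfold Pre_groupConsecutiveFixationCoord; infer_instance
def pvWitness_groupConsecutiveFixationCoord : (List (Int × Int)) × Int := ([(0, 1), (1, 2), (5, 3)], 2)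

def Spec_groupConsecutiveFixationCoord (li : List (Int × Int)) (maxgap : Int) (out : List (List Int)) : Prop := out = groupConsecutiveFixationCoord_alt li maxgap
instance (li : List (Int × Int)) (maxgap : Int) (out : List (List Int)) : Decidable (Spec_groupConsecutiveFixationCoord li maxgap out) := by unfold Spec_groupConsecutiveFixationCoord; infer_instance

-- ===== CLAIM (what is proved, stated in full; the proofs are below) =====
def Claim_equal_groupConsecutiveFixationCoord : Prop := ∀ (li : List (Int × Int)) (maxgap : Int), Dom_groupConsecutiveFixationCoord li maxgap → Pre_groupConsecutiveFixationCoord li maxgap → Spec_groupConsecutiveFixationCoord li maxgap (groupConsecutiveFixationCoord li maxgap)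

-- ===== LEMMAS AND PROOFS =====

-- prepend `out` onto the first group (the empty case never occurs for pvC's results)
def pvConsOut (out : List Int) : List (List Int) → List (List Int)
  | [] => [out]
  | g :: gs => (out ++ g) :: gs

-- reference recursion: grouping with a running `last`
def pvC (maxgap : Int) : Int → List (Int × Int) → List (List Int)
  | _, [] => [[]]
  | last, x :: rest =>
      if x.1 - last > maxgap then [] :: pvConsOut [x.2] (pvC maxgap x.1 rest)
      else pvConsOut [x.2] (pvC maxgap x.1 rest)

theorem pvConsOut_consOut (a b : List Int) (l : List (List Int)) :
    pvConsOut a (pvConsOut b l) = pvConsOut (a ++ b) l := by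
  cases l <;> simp [pvConsOut]

-- ---- A side ----
theorem pvFoldA (maxgap : Int) (li : List (Int × Int)) :
    ∀ (acc : List (List Int)) (out : List Int) (last : Int),
    (let st := li.foldl
      (fun (s : List (List Int) × List Int × Int) (x : Int × Int) =>
        if x.1 - s.2.2 > maxgap then (s.1 ++ [s.2.1], [x.2], x.1)
        else (s.1, s.2.1 ++ [x.2], x.1)) (acc, out, last)
     st.1 ++ [st.2.1]) = acc ++ pvConsOut out (pvC maxgap last li) := by
  induction li with
  | nil => intro acc out last; simp [pvC, pvConsOut]
  | cons x rest ih =>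
      intro acc out last
      rw [List.foldl_cons]
      show (let st := rest.foldl _ (if x.1 - last > maxgap then (acc ++ [out], [x.2], x.1)
              else (acc, out ++ [x.2], x.1)); st.1 ++ [st.2.1]) = _
      by_cases h : x.1 - last > maxgap
      · rw [if_pos h, ih]
        try simp [pvC, h, pvConsOut]
      · rw [if_neg h, ih]
        simp only [pvC, if_neg h]
        rw [pvConsOut_consOut]
        try simp

-- ---- B side ----
-- B's zip(prevs, li) is the predecessor chain
def pvChain (prev : Int × Int) : List (Int × Int) → List ((Int × Int) × (Int × Int))
  | [] => []
  | x :: rest => (prev, x) :: pvChain x rest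

theorem pvZip_dropLast (li : List (Int × Int)) :
    ∀ prev, ((prev :: li.dropLast).zip li) = pvChain prev li := by
  induction li with
  | nil => intro prev; simp [pvChain]
  | cons x rest ih =>
      intro prev
      cases rest with
      | nil => simp [pvChain]
      | cons y t =>
          have hd : (x :: y :: t).dropLast = x :: (y :: t).dropLast := by simp
          rw [hd, List.zip_cons_cons, ih x]
          rfl

-- break flags along the chain
def pvFlags (maxgap : Int) : Int → List (Int × Int) → List Bool
  | _, [] => []
  | last, x :: rest => decide (x.1 - last > maxgap) :: pvFlags maxgap x.1 rest

theorem pvChain_map_flags (maxgap : Int) (li : List (Int × Int)) :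
    ∀ prev, (pvChain prev li).map (fun q => decide (q.2.1 - q.1.1 > maxgap))
      = pvFlags maxgap prev.1 li := by
  induction li with
  | nil => intro prev; simp [pvChain, pvFlags]
  | cons x rest ih => intro prev; simp [pvChain, pvFlags, ih x]

-- indices of true flags, starting at i
def pvIdxs (i : Int) : List Bool → List Int
  | [] => []
  | f :: fs => if f then i :: pvIdxs (i + 1) fs else pvIdxs (i + 1) fs

theorem pvEnumFilter {α : Type} (cond : α → Bool) (l : List α) :
    ∀ i, ((PySem.List.enumerate l i).filter (fun q => cond q.2)).map (fun q => q.1)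
      = pvIdxs i (l.map cond) := by
  induction l with
  | nil => intro i; simp [PySem.List.enumerate_nil, pvIdxs]
  | cons x rest ih =>
      intro i
      rw [PySem.List.enumerate_cons]
      by_cases h : cond x = true
      · simp [List.filter_cons, h, pvIdxs, ih]
      · simp [List.filter_cons, h, pvIdxs, ih]

theorem pvIdxs_shift (fs : List Bool) : ∀ i, pvIdxs (i + 1) fs = (pvIdxs i fs).map (· + 1) := by
  induction fs with
  | nil => intro i; simp [pvIdxs]
  | cons f t ih =>
      intro i
      by_cases h : f = true <;> simp [pvIdxs, h, ih (i + 1), ih i]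

theorem pvIdxs_nonneg (fs : List Bool) : ∀ i c, c ∈ pvIdxs i fs → i ≤ c := by
  induction fs with
  | nil => intro i c h; simp [pvIdxs] at h
  | cons f t ih =>
      intro i c h
      by_cases hf : f = true
      · simp [pvIdxs, hf] at h
        rcases h with h | h
        · omega
        · have := ih (i + 1) c h; omega
      · simp [pvIdxs, hf] at h
        have := ih (i + 1) c h; omega

-- adjacency: l.zip l.tail as a recursion
def pvAdj : List Int → List (Int × Int)
  | a :: b :: r => (a, b) :: pvAdj (b :: r)
  | _ => []

theorem pvAdj_eq_zip_tail (l : List Int) : l.zip l.tail = pvAdj l := by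
  induction l with
  | nil => simp [pvAdj]
  | cons a t ih =>
      cases t with
      | nil => simp [pvAdj]
      | cons b r => simp only [List.tail_cons, List.zip_cons_cons, pvAdj]; rw [← ih]; simp

theorem pvAdj_map_shift (t : List Int) :
    ∀ a, pvAdj ((a + 1) :: t.map (· + 1)) = (pvAdj (a :: t)).map (fun ab => (ab.1 + 1, ab.2 + 1)) := by
  induction t with
  | nil => intro a; simp [pvAdj]
  | cons b r ih =>
      intro a
      simp only [List.map_cons, pvAdj, ih b]
      try simp

-- B's final map over adjacent bound pairs
def pvSplit (li : List (Int × Int)) (bounds : List Int) : List (List Int) :=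
  (pvAdj bounds).map (fun ab => (PySem.List.slice li (some ab.1) (some ab.2)).map (fun x => x.2))

theorem pvSlice_cons_shift (x : Int × Int) (rest : List (Int × Int)) (a b : Int)
    (ha : 0 ≤ a) (hb : 0 ≤ b) :
    PySem.List.slice (x :: rest) (some (a + 1)) (some (b + 1)) = PySem.List.slice rest (some a) (some b) := by
  rw [PySem.List.slice_toNat _ (show (0:Int) ≤ a + 1 by omega) (show (0:Int) ≤ b + 1 by omega),
      PySem.List.slice_toNat _ ha hb]
  have h1 : (a + 1).toNat = a.toNat + 1 := by omega
  have h2 : (b + 1).toNat = b.toNat + 1 := by omega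
  rw [h1, h2]
  simp only [List.drop_succ_cons]
  congr 1
  omega

theorem pvSlice_cons_zero (x : Int × Int) (rest : List (Int × Int)) (c : Int) (hc : 0 ≤ c) :
    PySem.List.slice (x :: rest) (some 0) (some (c + 1)) = x :: PySem.List.slice rest (some 0) (some c) := by
  rw [PySem.List.slice_toNat _ le_rfl (show (0:Int) ≤ c + 1 by omega),
      PySem.List.slice_toNat _ le_rfl hc]
  have h2 : (c + 1).toNat = c.toNat + 1 := by omega
  simp [h2, List.take_succ_cons]

theorem pvAdj_nonneg (l : List Int) (hall : ∀ z ∈ l, 0 ≤ z) :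
    ∀ p ∈ pvAdj l, 0 ≤ p.1 ∧ 0 ≤ p.2 := by
  induction l with
  | nil => intro p hp; simp [pvAdj] at hp
  | cons a s ih =>
      cases s with
      | nil => intro p hp; simp [pvAdj] at hp
      | cons b r =>
          intro p hp
          simp only [pvAdj, List.mem_cons] at hp
          rcases hp with hp | hp
          · subst hp
            exact ⟨hall a (by simp), hall b (by simp)⟩
          · exact ih (fun z hz => hall z (List.mem_cons_of_mem a hz)) p hp

-- shift lemma: splitting x::rest at bounds 0 :: (t+1) prepends x.2 onto the first group of rest's split
theorem pvSplit_shift (x : Int × Int) (rest : List (Int × Int)) (t : List Int)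
    (ht : ∀ c ∈ t, 0 ≤ c) (hne : t ≠ []) :
    pvSplit (x :: rest) (0 :: t.map (· + 1)) = pvConsOut [x.2] (pvSplit rest (0 :: t)) := by
  cases t with
  | nil => exact absurd rfl hne
  | cons c t₂ =>
      have hc : 0 ≤ c := ht c (by simp)
      simp only [List.map_cons, pvSplit, pvAdj, List.map_cons]
      rw [pvAdj_map_shift t₂ c]
      rw [pvSlice_cons_zero x rest c hc]
      simp only [List.map_map, pvConsOut, List.map_cons]
      congr 1
      refine List.map_congr_left ?_
      rintro ⟨a, b⟩ hab
      have h1 := pvAdj_nonneg (c :: t₂) ht ⟨a, b⟩ hab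
      show List.map (fun x => x.2) (PySem.List.slice (x :: rest) (some (a + 1)) (some (b + 1)))
          = List.map (fun x => x.2) (PySem.List.slice rest (some a) (some b))
      rw [pvSlice_cons_shift x rest a b h1.1 h1.2]

theorem pvIdxs_append_nonneg (fs : List Bool) (m : Int) (hm : 0 ≤ m) :
    ∀ c ∈ pvIdxs 0 fs ++ [m], 0 ≤ c := by
  intro c hc
  rcases List.mem_append.mp hc with h | h
  · exact pvIdxs_nonneg fs 0 c h
  · simp at h; omega

-- main B-side lemma
theorem pvSplitMain (maxgap : Int) (li : List (Int × Int)) :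
    ∀ last, pvSplit li ((0 :: pvIdxs 0 (pvFlags maxgap last li)) ++ [(li.length : Int)])
      = pvConsOut [] (pvC maxgap last li) := by
  induction li with
  | nil =>
      intro last
      simp [pvFlags, pvIdxs, pvSplit, pvAdj, pvC, pvConsOut, PySem.List.slice]
  | cons x rest ih =>
      intro last
      have hlen : ((x :: rest).length : Int) = (rest.length : Int) + 1 := by
        push_cast [List.length_cons]
        ring
      set f := decide (x.1 - last > maxgap) with hf
      have hflags : pvFlags maxgap last (x :: rest) = f :: pvFlags maxgap x.1 rest := rfl
      set fs' := pvFlags maxgap x.1 rest with hfs'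
      have htail : pvIdxs 1 fs' ++ [((x :: rest).length : Int)]
          = (pvIdxs 0 fs' ++ [(rest.length : Int)]).map (· + 1) := by
        rw [hlen]
        have : pvIdxs 1 fs' = pvIdxs (0 + 1) fs' := by norm_num
        rw [this, pvIdxs_shift fs' 0]
        simp
      have hne : pvIdxs 0 fs' ++ [(rest.length : Int)] ≠ [] := by simp
      have ht : ∀ c ∈ pvIdxs 0 fs' ++ [(rest.length : Int)], 0 ≤ c :=
        pvIdxs_append_nonneg fs' _ (by positivity)
      have hshift := pvSplit_shift x rest (pvIdxs 0 fs' ++ [(rest.length : Int)]) ht hne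
      by_cases h : x.1 - last > maxgap
      · have hfT : f = true := by simp [hf, h]
        have hb : (0 :: pvIdxs 0 (pvFlags maxgap last (x :: rest))) ++ [((x :: rest).length : Int)]
            = 0 :: 0 :: (pvIdxs 0 fs' ++ [(rest.length : Int)]).map (· + 1) := by
          rw [hflags, hfT]
          simp only [pvIdxs, if_pos]
          have h01 : pvIdxs (0 + 1) fs' = pvIdxs 1 fs' := by norm_num
          rw [h01, ← htail]
          try simp
        rw [hb]
        have hsplit0 : pvSplit (x :: rest) (0 :: 0 :: (pvIdxs 0 fs' ++ [(rest.length : Int)]).map (· + 1))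
            = [] :: pvSplit (x :: rest) (0 :: (pvIdxs 0 fs' ++ [(rest.length : Int)]).map (· + 1)) := by
          simp only [pvSplit]
          cases hmap : (pvIdxs 0 fs' ++ [(rest.length : Int)]).map (· + 1) with
          | nil => exact absurd (List.map_eq_nil_iff.mp hmap) hne
          | cons u v =>
              simp only [pvAdj, List.map_cons]
              rw [PySem.List.slice_toNat _ le_rfl le_rfl]
              simp
        rw [hsplit0, hshift, hfs', ← List.cons_append, ih x.1]
        simp only [pvC, if_pos h]
        cases pvC maxgap x.1 rest <;> simp [pvConsOut]
      · have hfT : f = false := by simp [hf, h]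
        have hb : (0 :: pvIdxs 0 (pvFlags maxgap last (x :: rest))) ++ [((x :: rest).length : Int)]
            = 0 :: (pvIdxs 0 fs' ++ [(rest.length : Int)]).map (· + 1) := by
          rw [hflags, hfT]
          simp only [pvIdxs, if_neg]
          have h01 : pvIdxs (0 + 1) fs' = pvIdxs 1 fs' := by norm_num
          rw [h01, ← htail]
          try simp
        rw [hb, hshift, hfs', ← List.cons_append, ih x.1]
        simp only [pvC, if_neg h]
        cases pvC maxgap x.1 rest <;> simp [pvConsOut]

-- B unfolds to pvSplit over pvIdxs of pvFlags
theorem pvAltEq (maxgap : Int) (p : Int × Int) (rest : List (Int × Int)) :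
    groupConsecutiveFixationCoord_alt (p :: rest) maxgap
      = pvSplit (p :: rest) ((0 :: pvIdxs 0 (pvFlags maxgap p.1 (p :: rest))) ++ [((p :: rest).length : Int)]) := by
  unfold groupConsecutiveFixationCoord_alt
  simp only []
  have hprevs : PySem.List.slice (p :: rest) none (some 1) ++ PySem.List.slice (p :: rest) none (some (-1))
      = p :: (p :: rest).dropLast := by
    rw [PySem.List.slice_to_neg_one]
    have : PySem.List.slice (p :: rest) none (some (1 : Int)) = [p] := by
      have := PySem.List.slice_to_natCast (p :: rest) 1
      simpa using this
    rw [this]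
    simp
  rw [hprevs, pvZip_dropLast (p :: rest) p]
  have hbr : ((PySem.List.enumerate (pvChain p (p :: rest)) 0).filter
        (fun q => decide (q.2.2.1 - q.2.1.1 > maxgap))).map (fun q => q.1)
      = pvIdxs 0 (pvFlags maxgap p.1 (p :: rest)) := by
    rw [pvEnumFilter (fun q => decide (q.2.1 - q.1.1 > maxgap)) (pvChain p (p :: rest)) 0]
    rw [pvChain_map_flags maxgap (p :: rest) p]
  rw [hbr]
  simp only [pvSplit, pvAdj_eq_zip_tail]
  simp

-- ===== VERDICT (by name: the statement is the Claim_ definition above) =====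
theorem groupConsecutiveFixationCoord_spec : Claim_equal_groupConsecutiveFixationCoord := by
  intro li maxgap _ hpre
  unfold Spec_groupConsecutiveFixationCoord
  cases li with
  | nil => exact absurd rfl hpre
  | cons p rest =>
      rw [pvAltEq maxgap p rest, pvSplitMain maxgap (p :: rest) p.1]
      unfold groupConsecutiveFixationCoord
      have hget : PySem.List.pyGet? (p :: rest) 0 = some p := by
        simp [PySem.List.pyGet?, PySem.List.pyIdx?]
      rw [hget]
      exact pvFoldA maxgap (p :: rest) [] [] p.1
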